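-- pv_equiv track=rewrite | github.com/azizclass/Zijiang-Yang-APT | Lab1/Part1/compute_highest_affinity.py | highest_affinity
-- ===== SOURCE A (Python) =====
-- def highest_affinity(site_list, user_list, time_list):
--     # Returned string pair should be ordered by dictionary order
--     # I.e., if the highest affinity pair is "foo" and "bar"
--     # return ("bar", "foo").
--     siteViewers = {}
--     for x,y in zip(site_list, user_list):
--         if not x in siteViewers:
--             siteViewers[x] = set()
--         siteViewers[x].add(y)
--     Pair = None
--     affinity = -1
--     for i in sorted(siteViewers.keys()):
--         for j in sorted(siteViewers.keys()):
--             if i == j: continue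
--             curAffinity = len(siteViewers[i] & siteViewers[j])
--             if affinity < curAffinity:
--                 affinity = curAffinity
--                 Pair = (i, j)
--
--     return Pair
-- ===== SOURCE B (Python) =====
-- def highest_affinity(site_list, user_list, time_list):
--     # Invert to user -> visited sites, then count co-occurrence for each
--     # ordered (lexicographic) site pair via one counter; finally scan the
--     # lexicographically ordered pairs of distinct sites once, keeping the
--     # first pair that strictly improves the affinity.
--     user_sites = {}
--     for s, u in zip(site_list, user_list):
--         user_sites.setdefault(u, []).append(s)
--
--     counts = {}
--     for viewed in user_sites.values():
--         vs = sorted(set(viewed))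
--         for a, s1 in enumerate(vs):
--             for s2 in vs[a + 1:]:
--                 counts[(s1, s2)] = counts.get((s1, s2), 0) + 1
--
--     sites = sorted({s for s, _ in zip(site_list, user_list)})
--     best = None
--     best_count = -1
--     for a, s1 in enumerate(sites):
--         for s2 in sites[a + 1:]:
--             c = counts.get((s1, s2), 0)
--             if best_count < c:
--                 best_count = c
--                 best = (s1, s2)
--     return best
-- ===== Notes on version B (the rewrite author's own statement) =====
-- stated objective: faster
-- what changed: Instead of intersecting the viewer sets of every ordered site pair, B inverts the data to a user->sites index, accumulates pair co-occurrence counts in one dictionary, and scans only the lexicographically ordered distinct site pairs once with O(1) lookups.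
import Mathlib
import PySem

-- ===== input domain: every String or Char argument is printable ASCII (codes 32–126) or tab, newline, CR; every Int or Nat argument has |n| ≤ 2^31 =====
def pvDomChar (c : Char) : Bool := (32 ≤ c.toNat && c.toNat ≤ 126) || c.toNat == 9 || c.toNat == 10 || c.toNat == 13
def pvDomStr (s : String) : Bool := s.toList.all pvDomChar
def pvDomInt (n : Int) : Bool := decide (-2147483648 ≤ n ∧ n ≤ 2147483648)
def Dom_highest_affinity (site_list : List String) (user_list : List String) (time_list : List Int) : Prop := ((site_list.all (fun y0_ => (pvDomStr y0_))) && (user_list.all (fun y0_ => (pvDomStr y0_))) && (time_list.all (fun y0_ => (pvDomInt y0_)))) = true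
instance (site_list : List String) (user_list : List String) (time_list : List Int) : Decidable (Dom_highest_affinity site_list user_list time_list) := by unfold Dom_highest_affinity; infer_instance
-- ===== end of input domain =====

-- B replaces A's per-pair viewer-set intersections by a user→sites inverted index feeding one
-- pair-co-occurrence counter, then a single lexicographic scan of the distinct site pairs (objective: faster).

-- ===== PORT A =====
def highest_affinity (site_list : List String) (user_list : List String) (time_list : List Int) : Option (String × String) :=
  let siteViewers : PySem.Dict String (PySem.Set String) :=
    (site_list.zip user_list).foldl
      (fun d p =>
        let d1 := if d.contains p.1 then d else d.insert p.1 PySem.Set.empty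
        d1.insert p.1 (PySem.Set.add (d1.getD p.1 PySem.Set.empty) p.2))
      PySem.Dict.empty
  let ks := PySem.List.sorted siteViewers.keys (fun x => x) false
  let r := ks.foldl
    (fun s i => ks.foldl
      (fun s j =>
        if i == j then s
        else
          let curAffinity := PySem.Set.len (PySem.Set.inter (siteViewers.getD i PySem.Set.empty) (siteViewers.getD j PySem.Set.empty))
          if s.1 < curAffinity then (curAffinity, some (i, j)) else s)
      s)
    ((-1 : Int), (none : Option (String × String)))
  r.2

-- ===== PORT B =====
def highest_affinity_alt (site_list : List String) (user_list : List String) (time_list : List Int) : Option (String × String) :=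
  let user_sites : PySem.Dict String (List String) :=
    (site_list.zip user_list).foldl (fun d p => d.modify p.2 [] (fun l => l ++ [p.1])) PySem.Dict.empty
  let counts : PySem.Dict (String × String) Int :=
    user_sites.values.foldl
      (fun c viewed =>
        let vs := PySem.List.sorted (PySem.Set.ofList viewed) (fun x => x) false
        (PySem.List.enumerate vs).foldl
          (fun c ai =>
            (PySem.List.slice vs (some (ai.1 + 1))).foldl
              (fun c s2 => c.insert (ai.2, s2) (c.getD (ai.2, s2) 0 + 1)) c)
          c)
      PySem.Dict.empty
  let sites := PySem.List.sorted (PySem.Set.ofList ((site_list.zip user_list).map (fun p => p.1))) (fun x => x) false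
  let r := (PySem.List.enumerate sites).foldl
    (fun s ai =>
      (PySem.List.slice sites (some (ai.1 + 1))).foldl
        (fun s s2 =>
          let c := counts.getD (ai.2, s2) 0
          if s.1 < c then (c, some (ai.2, s2)) else s)
        s)
    ((-1 : Int), (none : Option (String × String)))
  r.2

-- ===== PRECONDITION & SPEC =====
def Spec_highest_affinity (site_list : List String) (user_list : List String) (time_list : List Int) (out : Option (String × String)) : Prop := out = highest_affinity_alt site_list user_list time_list
instance (site_list : List String) (user_list : List String) (time_list : List Int) (out : Option (String × String)) : Decidable (Spec_highest_affinity site_list user_list time_list out) := by unfold Spec_highest_affinity; infer_instance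

-- ===== CLAIM (what is proved, stated in full; the proofs are below) =====
def Claim_equal_highest_affinity : Prop := ∀ (site_list : List String) (user_list : List String) (time_list : List Int), Dom_highest_affinity site_list user_list time_list → Spec_highest_affinity site_list user_list time_list (highest_affinity site_list user_list time_list)

-- ===== LEMMAS AND PROOFS =====

-- proof-side vocabulary ------------------------------------------------------
def pvPairsTri {α : Type} : List α → List (α × α)
  | [] => []
  | x :: t => (t.map (fun y => (x, y))) ++ pvPairsTri t

def pvFullPairs (K : List String) : List (String × String) :=
  K.flatMap (fun i => (K.filter (fun j => !(i == j))).map (fun j => (i, j)))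

def pvStep {α : Type} (score : α → Int) (s : Int × Option α) (x : α) : Int × Option α :=
  if s.1 < score x then (score x, some x) else s

def pvMax {α : Type} (score : α → Int) (a : Int) (L : List α) : Int :=
  L.foldl (fun m x => max m (score x)) a

def pvLt (p q : String × String) : Prop := p.1 < q.1 ∨ (p.1 = q.1 ∧ p.2 < q.2)

def pvViewers (zs : List (String × String)) (x : String) : PySem.Set String :=
  PySem.Set.ofList ((zs.filter (fun q => q.1 == x)).map (fun q => q.2))

def pvUsersOf (zs : List (String × String)) (u : String) : List String :=
  (zs.filter (fun q => q.2 == u)).map (fun q => q.1)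

def pvScoreA (zs : List (String × String)) (p : String × String) : Int :=
  PySem.Set.len (PySem.Set.inter (pvViewers zs p.1) (pvViewers zs p.2))

-- order facts about pvLt -----------------------------------------------------
theorem pvLt_irrefl (p : String × String) : ¬ pvLt p p := by
  rintro (h | ⟨-, h⟩) <;> exact lt_irrefl _ h
theorem pvLt_trans {p q r : String × String} : pvLt p q → pvLt q r → pvLt p r := by
  rintro (h1 | ⟨e1, h1⟩) (h2 | ⟨e2, h2⟩)
  · exact Or.inl (lt_trans h1 h2)
  · exact Or.inl (e2 ▸ h1)
  · exact Or.inl (e1 ▸ h2)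
  · exact Or.inr ⟨e1.trans e2, lt_trans h1 h2⟩
theorem pvLt_asymm {p q : String × String} : pvLt p q → pvLt q p → False := by
  intro h1 h2
  exact pvLt_irrefl p (pvLt_trans h1 h2)

-- generic fold shapes --------------------------------------------------------
theorem pvFoldl_skip {α β : Type} (p : α → Bool) (f : β → α → β) :
    ∀ (L : List α) (init : β),
      L.foldl (fun s x => if p x then s else f s x) init
        = (L.filter (fun x => !p x)).foldl f init := by
  intro L
  induction L with
  | nil => intro init; rfl
  | cons x t ih =>
    intro init
    by_cases hx : p x = true <;> simp [hx, ih]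

theorem pvEnum_flat {α β : Type} (step : β → α × α → β) (L₀ : List α) :
    ∀ (L : List α) (k : Nat), L₀.drop k = L → ∀ (init : β),
      (PySem.List.enumerate L (k : Int)).foldl
          (fun s ai => (PySem.List.slice L₀ (some (ai.1 + 1))).foldl
            (fun s y => step s (ai.2, y)) s) init
        = (pvPairsTri L).foldl step init := by
  intro L
  induction L with
  | nil => intro k h init; rfl
  | cons x t ih =>
    intro k h init
    have hdrop : L₀.drop (k + 1) = t := by
      have h2 : (L₀.drop k).tail = t := by rw [h]; rfl
      rwa [List.tail_drop] at h2
    have henum : PySem.List.enumerate (x :: t) (k : Int)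
        = ((k : Int), x) :: PySem.List.enumerate t ((k : Int) + 1) := rfl
    rw [henum, List.foldl_cons]
    have hsl : PySem.List.slice L₀ (some ((k : Int) + 1)) = t := by
      rw [PySem.List.slice_from L₀ (by positivity)]
      have ht : ((k : Int) + 1).toNat = k + 1 := by omega
      rw [ht, hdrop]
    show (PySem.List.enumerate t ((k : Int) + 1)).foldl _
        ((PySem.List.slice L₀ (some ((k : Int) + 1))).foldl (fun s y => step s (x, y)) init) = _
    rw [hsl]
    have hcast : ((k : Int) + 1) = ((k + 1 : Nat) : Int) := by push_cast; ring
    rw [hcast, ih (k + 1) hdrop]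
    show _ = (t.map (fun y => (x, y)) ++ pvPairsTri t).foldl step init
    rw [List.foldl_append, List.foldl_map]

theorem pvLe_max {α : Type} (score : α → Int) (L : List α) (a : Int) :
    a ≤ pvMax score a L ∧ ∀ x ∈ L, score x ≤ pvMax score a L := by
  have h := PySem.List.le_foldl_max (L.map score) a
  rw [List.foldl_map] at h
  exact ⟨h.1, fun x hx => h.2 _ (List.mem_map_of_mem hx)⟩

theorem pvBestFold_char {α : Type} (score : α → Int) :
    ∀ (L : List α) (a : Int) (P : Option α),
      L.foldl (pvStep score) (a, P)
        = (pvMax score a L,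
           if a < pvMax score a L then L.find? (fun x => score x == pvMax score a L) else P) := by
  intro L
  induction L with
  | nil => intro a P; simp [pvMax]
  | cons x t ih =>
    intro a P
    rw [List.foldl_cons]
    have hM : pvMax score a (x :: t) = pvMax score (max a (score x)) t := rfl
    by_cases h1 : a < score x
    · rw [show pvStep score (a, P) x = (score x, some x) from by simp [pvStep, h1]]
      rw [ih (score x) (some x), hM, max_eq_right h1.le]
      have hxM : score x ≤ pvMax score (score x) t := (pvLe_max score t (score x)).1
      have haM : a < pvMax score (score x) t := lt_of_lt_of_le h1 hxM
      rw [if_pos haM]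
      by_cases h2 : score x < pvMax score (score x) t
      · rw [if_pos h2]
        have hne : (score x == pvMax score (score x) t) = false := by
          simp [ne_of_lt h2]
        simp [hne]
      · rw [if_neg h2]
        have hEq : score x = pvMax score (score x) t := le_antisymm hxM (not_lt.mp h2)
        simp [← hEq]
    · rw [show pvStep score (a, P) x = (a, P) from by simp [pvStep, h1]]
      rw [ih a P, hM, max_eq_left (not_lt.mp h1)]
      by_cases h3 : a < pvMax score a t
      · rw [if_pos h3, if_pos h3]
        have hne : (score x == pvMax score a t) = false := by
          simp [ne_of_lt (lt_of_le_of_lt (not_lt.mp h1) h3)]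
        simp [hne]
      · rw [if_neg h3, if_neg h3]

theorem pvMax_le {α : Type} (score : α → Int) {c : Int} :
    ∀ {L : List α} {a : Int}, a ≤ c → (∀ x ∈ L, score x ≤ c) → pvMax score a L ≤ c := by
  intro L
  induction L with
  | nil => intro a ha _; exact ha
  | cons x t ih =>
    intro a ha hL
    have : max a (score x) ≤ c := max_le ha (hL x (List.mem_cons_self))
    exact ih this (fun y hy => hL y (List.mem_cons_of_mem _ hy))

theorem pvMax_mem {α : Type} (score : α → Int) :
    ∀ (L : List α) (a : Int), pvMax score a L = a ∨ ∃ x ∈ L, pvMax score a L = score x := by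
  intro L
  induction L with
  | nil => intro a; exact Or.inl rfl
  | cons x t ih =>
    intro a
    have h := ih (max a (score x))
    have hstep : pvMax score a (x :: t) = pvMax score (max a (score x)) t := rfl
    rcases h with h | ⟨y, hy, hEq⟩
    · rcases max_choice a (score x) with hm | hm
      · exact Or.inl (by rw [hstep, h, hm])
      · exact Or.inr ⟨x, List.mem_cons_self, by rw [hstep, h, hm]⟩
    · exact Or.inr ⟨y, List.mem_cons_of_mem _ hy, by rw [hstep, hEq]⟩

-- membership / order of the pair lists ---------------------------------------
theorem pvMem_fullPairs {K : List String} {p : String × String} :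
    p ∈ pvFullPairs K ↔ p.1 ∈ K ∧ p.2 ∈ K ∧ p.1 ≠ p.2 := by
  simp only [pvFullPairs, List.mem_flatMap, List.mem_map, List.mem_filter]
  constructor
  · rintro ⟨i, hi, j, ⟨hj, hne⟩, rfl⟩
    simp at hne
    exact ⟨hi, hj, hne⟩
  · rintro ⟨h1, h2, hne⟩
    exact ⟨p.1, h1, p.2, ⟨h2, by simpa using hne⟩, rfl⟩

theorem pvMem_pairsTri {K : List String} (hK : K.Pairwise (· < ·)) {p : String × String} :
    p ∈ pvPairsTri K ↔ p.1 ∈ K ∧ p.2 ∈ K ∧ p.1 < p.2 := by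
  induction K with
  | nil => simp [pvPairsTri]
  | cons x t ih =>
    rcases List.pairwise_cons.mp hK with ⟨hx, ht⟩
    simp only [pvPairsTri, List.mem_append, List.mem_map, ih ht, List.mem_cons]
    constructor
    · rintro (⟨y, hy, rfl⟩ | ⟨h1, h2, h3⟩)
      · exact ⟨Or.inl rfl, Or.inr hy, hx y hy⟩
      · exact ⟨Or.inr h1, Or.inr h2, h3⟩
    · rintro ⟨h1 | h1, h2 | h2, h3⟩
      · exact absurd h3 (by rw [h1, h2]; exact lt_irrefl _)
      · exact Or.inl ⟨p.2, h2, by rw [← h1]⟩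
      · exact absurd (lt_trans (h2 ▸ h3) (hx p.1 h1)) (lt_irrefl _)
      · exact Or.inr ⟨h1, h2, h3⟩

theorem pvPairwise_fullPairs {K : List String} (hK : K.Pairwise (· < ·)) :
    (pvFullPairs K).Pairwise pvLt := by
  rw [pvFullPairs, List.pairwise_flatMap]
  constructor
  · intro i _
    rw [List.pairwise_map]
    exact (hK.filter _).imp (fun h => Or.inr ⟨rfl, h⟩)
  · exact hK.imp (by
      rintro a b hab p hp q hq
      simp only [List.mem_map] at hp hq
      obtain ⟨j1, -, rfl⟩ := hp
      obtain ⟨j2, -, rfl⟩ := hq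
      exact Or.inl hab)

theorem pvPairwise_pairsTri {K : List String} (hK : K.Pairwise (· < ·)) :
    (pvPairsTri K).Pairwise pvLt := by
  induction K with
  | nil => exact List.Pairwise.nil
  | cons x t ih =>
    rcases List.pairwise_cons.mp hK with ⟨hx, ht⟩
    refine List.pairwise_append.mpr ⟨?_, ih ht, ?_⟩
    · rw [List.pairwise_map]
      exact ht.imp (fun h => Or.inr ⟨rfl, h⟩)
    · intro p hp q hq
      simp only [List.mem_map] at hp
      obtain ⟨y, hy, rfl⟩ := hp
      have h1 := ((pvMem_pairsTri ht).mp hq).1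
      exact Or.inl (hx q.1 h1)

-- the selection argument -----------------------------------------------------
theorem pvSelect_eq (K : List String) (hK : K.Pairwise (· < ·))
    (sA sB : String × String → Int)
    (hsym : ∀ i j, sA (i, j) = sA (j, i))
    (hagree : ∀ p ∈ pvPairsTri K, sB p = sA p)
    (hnn : ∀ p, 0 ≤ sA p) :
    ((pvFullPairs K).foldl (pvStep sA) (-1, none)).2
      = ((pvPairsTri K).foldl (pvStep sB) (-1, none)).2 := by
  have hTri := pvPairwise_pairsTri hK
  have hFull := pvPairwise_fullPairs hK
  rw [pvBestFold_char, pvBestFold_char]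
  have hTF : ∀ p ∈ pvPairsTri K, p ∈ pvFullPairs K := by
    intro p hp
    have h := (pvMem_pairsTri hK).mp hp
    exact pvMem_fullPairs.mpr ⟨h.1, h.2.1, ne_of_lt h.2.2⟩
  have hMirror : ∀ p ∈ pvFullPairs K, ∃ q ∈ pvPairsTri K, sA q = sA p ∧ (q = p ∨ pvLt q p) := by
    intro p hp
    obtain ⟨h1, h2, hne⟩ := pvMem_fullPairs.mp hp
    rcases lt_or_gt_of_ne hne with h | h
    · exact ⟨p, (pvMem_pairsTri hK).mpr ⟨h1, h2, h⟩, rfl, Or.inl rfl⟩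
    · exact ⟨(p.2, p.1), (pvMem_pairsTri hK).mpr ⟨h2, h1, h⟩,
        (hsym p.2 p.1).trans rfl, Or.inr (Or.inl h)⟩
  have hMeq : pvMax sA (-1) (pvFullPairs K) = pvMax sB (-1) (pvPairsTri K) := by
    apply le_antisymm
    · apply pvMax_le
      · exact le_trans (le_refl _) (pvLe_max sB (pvPairsTri K) (-1)).1
      · intro p hp
        obtain ⟨q, hq, hEq, -⟩ := hMirror p hp
        calc sA p = sB q := by rw [← hEq, hagree q hq]
        _ ≤ _ := (pvLe_max sB _ _).2 q hq
    · apply pvMax_le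
      · exact (pvLe_max sA _ _).1
      · intro p hp
        rw [hagree p hp]
        exact (pvLe_max sA _ _).2 p (hTF p hp)
  by_cases hE : pvPairsTri K = []
  · have hFE : pvFullPairs K = [] := by
      cases hF : pvFullPairs K with
      | nil => rfl
      | cons p l =>
        exfalso
        obtain ⟨q, hq, -, -⟩ := hMirror p (by rw [hF]; exact List.mem_cons_self)
        rw [hE] at hq
        exact absurd hq (List.not_mem_nil)
    rw [hE, hFE]
    simp [pvMax]
  · obtain ⟨p0, hp0⟩ := List.exists_mem_of_ne_nil _ hE
    have h0T : (0 : Int) ≤ pvMax sB (-1) (pvPairsTri K) := by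
      refine le_trans ?_ ((pvLe_max sB _ _).2 p0 hp0)
      rw [hagree p0 hp0]; exact hnn p0
    have hTlt : (-1 : Int) < pvMax sB (-1) (pvPairsTri K) := lt_of_lt_of_le (by norm_num) h0T
    have hFlt : (-1 : Int) < pvMax sA (-1) (pvFullPairs K) := by rw [hMeq]; exact hTlt
    rw [if_pos hFlt, if_pos hTlt]
    have hex : ∃ q ∈ pvPairsTri K, (fun x => sB x == pvMax sB (-1) (pvPairsTri K)) q = true := by
      rcases pvMax_mem sB (pvPairsTri K) (-1) with h | ⟨q, hq, hEq⟩
      · exact absurd h (by intro h; rw [h] at hTlt; exact absurd hTlt (lt_irrefl _))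
      · exact ⟨q, hq, by simp [hEq]⟩
    obtain ⟨q0, hq0⟩ := Option.isSome_iff_exists.mp (List.find?_isSome.mpr hex)
    rw [hq0]
    obtain ⟨hpred0, as, bs, hdec, hfail⟩ := List.find?_eq_some_iff_append.mp hq0
    have hq0T : q0 ∈ pvPairsTri K := by rw [hdec]; simp
    have hsAq0 : sA q0 = pvMax sB (-1) (pvPairsTri K) := by
      rw [← hagree q0 hq0T]; simpa using hpred0
    obtain ⟨cs, ds, hfdec⟩ := List.append_of_mem (hTF q0 hq0T)
    apply List.find?_eq_some_iff_append.mpr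
    refine ⟨by simp [hMeq, hsAq0], cs, ds, hfdec, ?_⟩
    intro y hy
    have hyq0 : pvLt y q0 := by
      have hP := hFull
      rw [hfdec] at hP
      rcases List.pairwise_append.mp hP with ⟨-, -, hcross⟩
      exact hcross y hy q0 (List.mem_cons_self)
    have hyF : y ∈ pvFullPairs K := by
      rw [hfdec]; exact List.mem_append_left _ hy
    simp only [Bool.not_eq_eq_eq_not, Bool.not_true, beq_eq_false_iff_ne, ne_eq]
    intro hyM
    rw [hMeq] at hyM
    obtain ⟨q', hq'T, hq'Eq, hq'le⟩ := hMirror y hyF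
    have hpred' : (sB q' == pvMax sB (-1) (pvPairsTri K)) = true := by
      simp [hagree q' hq'T, hq'Eq, hyM]
    have hq'mem : q' ∈ as ++ q0 :: bs := hdec ▸ hq'T
    rcases List.mem_append.mp hq'mem with h | h
    · exact absurd hpred' (by simpa using hfail q' h)
    · rcases List.mem_cons.mp h with h | h
      · rcases hq'le with hq'y | hlt
        · subst hq'y; subst h; exact pvLt_irrefl _ hyq0
        · exact pvLt_asymm (h ▸ hlt) hyq0
      · have hq0q' : pvLt q0 q' := by
          have hP := hTri
          rw [hdec] at hP
          rcases List.pairwise_append.mp hP with ⟨-, h2, -⟩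
          exact (List.pairwise_cons.mp h2).1 q' h
        rcases hq'le with hq'y | hlt
        · exact pvLt_asymm (hq'y ▸ hq0q') hyq0
        · exact pvLt_asymm (pvLt_trans hq0q' hlt) hyq0

-- data lemmas: the two dictionaries ------------------------------------------
theorem pvDictA_getD (zs : List (String × String)) (x : String) :
    ((zs.foldl
        (fun d p =>
          let d1 := if d.contains p.1 then d else d.insert p.1 PySem.Set.empty
          d1.insert p.1 (PySem.Set.add (d1.getD p.1 PySem.Set.empty) p.2))
        PySem.Dict.empty).getD x PySem.Set.empty) = pvViewers zs x := by
  have aux : ∀ (l : List (String × String)) (d : PySem.Dict String (PySem.Set String)),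
      ((l.foldl
          (fun d p =>
            let d1 := if d.contains p.1 then d else d.insert p.1 PySem.Set.empty
            d1.insert p.1 (PySem.Set.add (d1.getD p.1 PySem.Set.empty) p.2))
          d).getD x PySem.Set.empty)
        = PySem.Set.update (d.getD x PySem.Set.empty)
            ((l.filter (fun q => q.1 == x)).map (fun q => q.2)) := by
    intro l
    induction l with
    | nil => intro d; simp [PySem.Set.update]
    | cons p l ihl =>
      intro d
      rw [List.foldl_cons, ihl]
      have hstep :
          (((if d.contains p.1 then d else d.insert p.1 PySem.Set.empty).insert p.1
              (PySem.Set.add ((if d.contains p.1 then d else d.insert p.1 PySem.Set.empty).getD p.1 PySem.Set.empty) p.2)).getD x PySem.Set.empty)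
            = if p.1 = x then PySem.Set.add (d.getD x PySem.Set.empty) p.2
              else d.getD x PySem.Set.empty := by
        by_cases hc : d.contains p.1 = true
        · rw [if_pos hc, PySem.Dict.getD_insert]
          by_cases hx : x = p.1
          · rw [if_pos hx, if_pos hx.symm, hx]
          · rw [if_neg hx, if_neg (fun h => hx h.symm)]
        · rw [if_neg hc, PySem.Dict.getD_insert]
          by_cases hx : x = p.1
          · rw [if_pos hx, if_pos hx.symm, PySem.Dict.getD_insert_self, hx,
              PySem.Dict.getD_of_not_contains _ _ (by simpa using hc)]
          · rw [if_neg hx, if_neg (fun h => hx h.symm),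
              PySem.Dict.getD_insert_of_ne _ _ _ hx]
      by_cases hpx : p.1 = x
      · rw [List.filter_cons_of_pos (by simp [hpx]), List.map_cons,
          PySem.Set.update_cons]
        exact congrArg
          (fun S => PySem.Set.update S ((l.filter (fun q => q.1 == x)).map (fun q => q.2)))
          (hstep.trans (if_pos hpx))
      · rw [List.filter_cons_of_neg (by simp [hpx])]
        exact congrArg
          (fun S => PySem.Set.update S ((l.filter (fun q => q.1 == x)).map (fun q => q.2)))
          (hstep.trans (if_neg hpx))
  rw [aux zs PySem.Dict.empty, PySem.Dict.getD_empty, pvViewers,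
    ← PySem.Set.update_nil_left]
  rfl

theorem pvDictA_keys (zs : List (String × String)) :
    ((zs.foldl
        (fun d p =>
          let d1 := if d.contains p.1 then d else d.insert p.1 PySem.Set.empty
          d1.insert p.1 (PySem.Set.add (d1.getD p.1 PySem.Set.empty) p.2))
        PySem.Dict.empty).keys) = PySem.Set.ofList (zs.map (fun q => q.1)) := by
  have aux : ∀ (l : List (String × String)) (d : PySem.Dict String (PySem.Set String)),
      ((l.foldl
          (fun d p =>
            let d1 := if d.contains p.1 then d else d.insert p.1 PySem.Set.empty
            d1.insert p.1 (PySem.Set.add (d1.getD p.1 PySem.Set.empty) p.2))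
          d).keys)
        = PySem.Set.update d.keys (l.map (fun q => q.1)) := by
    intro l
    induction l with
    | nil => intro d; simp [PySem.Set.update]
    | cons p l ihl =>
      intro d
      rw [List.foldl_cons, ihl, List.map_cons, PySem.Set.update_cons]
      have hstep :
          ((if d.contains p.1 then d else d.insert p.1 PySem.Set.empty).insert p.1
              (PySem.Set.add ((if d.contains p.1 then d else d.insert p.1 PySem.Set.empty).getD p.1 PySem.Set.empty) p.2)).keys
            = PySem.Set.add d.keys p.1 := by
        by_cases hc : d.contains p.1 = true
        · rw [if_pos hc, PySem.Dict.keys_insert_of_contains _ _ hc,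
            PySem.Set.add_of_mem ((PySem.Dict.contains_iff_mem_keys _ _).mp hc)]
        · rw [if_neg hc,
            PySem.Dict.keys_insert_of_contains _ _ (PySem.Dict.contains_insert_self _ _ _),
            PySem.Dict.keys_insert_of_not_contains _ _ (by simpa using hc),
            PySem.Set.add_of_not_mem
              (fun hm => hc ((PySem.Dict.contains_iff_mem_keys _ _).mpr hm))]
      exact congrArg (fun S => PySem.Set.update S (l.map (fun q => q.1))) hstep
  rw [aux zs PySem.Dict.empty, PySem.Dict.keys_empty, PySem.Set.update_nil_left]

theorem pvDictB_values (zs : List (String × String)) :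
    ((zs.foldl (fun d p => d.modify p.2 [] (fun l => l ++ [p.1])) PySem.Dict.empty).values)
      = (PySem.Set.ofList (zs.map (fun q => q.2))).map (fun u => pvUsersOf zs u) := by
  have hfold :
      (zs.foldl (fun d p => d.modify p.2 [] (fun l => l ++ [p.1])) PySem.Dict.empty)
        = ((zs.map Prod.swap).foldl (fun d q => d.modify q.1 [] (fun l => l ++ [q.2])) PySem.Dict.empty) := by
    rw [List.foldl_map]
    rfl
  have hkeys :
      ((zs.foldl (fun d p => d.modify p.2 [] (fun l => l ++ [p.1])) PySem.Dict.empty).keys)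
        = PySem.Set.ofList (zs.map (fun q => q.2)) := by
    rw [show (fun (d : PySem.Dict String (List String)) (p : String × String) =>
          d.modify p.2 [] (fun l => l ++ [p.1]))
        = (fun d p => d.modify ((fun q : String × String => q.2) p) []
            ((fun (_ : PySem.Dict String (List String)) (p : String × String) (l : List String) => l ++ [p.1]) d p)) from rfl]
    rw [PySem.Dict.keys_foldl_modify_key, PySem.Dict.keys_empty, PySem.Set.update_nil_left]
  have hgetD : ∀ u,
      ((zs.foldl (fun d p => d.modify p.2 [] (fun l => l ++ [p.1])) PySem.Dict.empty).getD u [])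
        = pvUsersOf zs u := by
    intro u
    rw [hfold, PySem.Dict.getD_foldl_modify_append, PySem.Dict.getD_empty, List.nil_append,
      List.filter_map, List.map_map, pvUsersOf]
    rfl
  have hnd : ((zs.foldl (fun d p => d.modify p.2 [] (fun l => l ++ [p.1])) PySem.Dict.empty).keys).Nodup := by
    rw [hkeys]; exact PySem.Set.nodup_ofList _
  rw [PySem.Dict.values_eq_map_keys _ hnd [], hkeys]
  exact List.map_congr_left (fun u _ => hgetD u)

-- counting lemmas ------------------------------------------------------------
theorem pvMem_usersOf {zs : List (String × String)} {u s : String} :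
    s ∈ pvUsersOf zs u ↔ (s, u) ∈ zs := by
  simp only [pvUsersOf, List.mem_map, List.mem_filter, beq_iff_eq]
  constructor
  · rintro ⟨q, ⟨hq, h2⟩, rfl⟩
    have : q = (q.1, u) := by rw [← h2]
    rwa [← this]
  · intro h
    exact ⟨(s, u), ⟨h, rfl⟩, rfl⟩

theorem pvMem_viewers {zs : List (String × String)} {x u : String} :
    u ∈ pvViewers zs x ↔ (x, u) ∈ zs := by
  simp only [pvViewers, PySem.Set.mem_ofList, List.mem_map, List.mem_filter, beq_iff_eq]
  constructor
  · rintro ⟨q, ⟨hq, h1⟩, rfl⟩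
    have : q = (x, q.2) := by rw [← h1]
    rwa [← this]
  · intro h
    exact ⟨(x, u), ⟨h, rfl⟩, rfl⟩

theorem pvSum_ite (p : String → Bool) :
    ∀ (U : List String), (U.map (fun u => if p u then (1 : Nat) else 0)).sum = U.countP p := by
  intro U
  induction U with
  | nil => rfl
  | cons u t ih => by_cases h : p u = true <;> simp [h, ih, Nat.add_comm]

theorem pvCount_pairsTri {vs : List String} (hvs : vs.Pairwise (· < ·))
    {i j : String} (hij : i < j) :
    (pvPairsTri vs).count (i, j) = if i ∈ vs ∧ j ∈ vs then 1 else 0 := by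
  induction vs with
  | nil => simp [pvPairsTri]
  | cons x t ih =>
    rcases List.pairwise_cons.mp hvs with ⟨hx, ht⟩
    have hnd : t.Nodup := (ht.imp ne_of_lt)
    rw [pvPairsTri, List.count_append, ih ht]
    by_cases hxi : x = i
    · subst hxi
      have hinj : Function.Injective (fun y => (x, y) : String → String × String) :=
        fun a b h => (Prod.mk.injEq _ _ _ _).mp h |>.2
      have hmap : (t.map (fun y => (x, y))).count (x, j) = t.count j :=
        List.count_map_of_injective t _ hinj j
      have hxt : x ∉ t := fun hm => absurd (hx x hm) (lt_irrefl x)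
      have hjx : j ≠ x := fun h => absurd (h ▸ hij) (lt_irrefl x)
      have htri : (if x ∈ t ∧ j ∈ t then 1 else 0) = 0 := by
        simp [hxt]
      rw [hmap, htri]
      by_cases hjt : j ∈ t
      · rw [List.count_eq_one_of_mem hnd hjt]
        simp [hjt]
      · rw [List.count_eq_zero_of_not_mem hjt]
        simp [hjt, hjx]
    · have hmap : (t.map (fun y => (x, y))).count (i, j) = 0 := by
        refine List.count_eq_zero_of_not_mem ?_
        simp only [List.mem_map, not_exists]
        rintro y ⟨-, hEq⟩
        exact hxi ((Prod.mk.injEq _ _ _ _).mp hEq).1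
      rw [hmap]
      by_cases hjxx : j = x
      · have hit : i ∉ t := fun hm =>
          absurd (lt_trans (hjxx ▸ hij) (hx i hm)) (lt_irrefl i)
        have hjt : j ∉ t := hjxx ▸ (fun hm => absurd (hx x hm) (lt_irrefl x))
        simp only [List.mem_cons, hit, hjt, or_false]
        simp [show ¬ i = x from fun h => hxi h.symm]
      · simp only [List.mem_cons, hjxx]
        have hix : (i = x ∨ i ∈ t) ↔ i ∈ t := or_iff_right (fun h => hxi h.symm)
        simp [and_congr_left' hix]

theorem pvCounts_getD (zs : List (String × String)) {i j : String} (hij : i < j) :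
    ((((zs.foldl (fun d p => d.modify p.2 [] (fun l => l ++ [p.1])) PySem.Dict.empty).values).foldl
        (fun c viewed =>
          let vs := PySem.List.sorted (PySem.Set.ofList viewed) (fun x => x) false
          (PySem.List.enumerate vs).foldl
            (fun c ai =>
              (PySem.List.slice vs (some (ai.1 + 1))).foldl
                (fun c s2 => c.insert (ai.2, s2) (c.getD (ai.2, s2) 0 + 1)) c)
            c)
        (PySem.Dict.empty : PySem.Dict (String × String) Int)).getD (i, j) 0)
      = (((PySem.Set.ofList (zs.map (fun q => q.2))).countP
          (fun u => decide ((i, u) ∈ zs) && decide ((j, u) ∈ zs)) : Nat) : Int) := by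
  have hflat : ∀ (viewed : List String) (c : PySem.Dict (String × String) Int),
      ((PySem.List.enumerate (PySem.List.sorted (PySem.Set.ofList viewed) (fun x => x) false)).foldl
          (fun c ai =>
            (PySem.List.slice (PySem.List.sorted (PySem.Set.ofList viewed) (fun x => x) false) (some (ai.1 + 1))).foldl
              (fun c s2 => c.insert (ai.2, s2) (c.getD (ai.2, s2) 0 + 1)) c)
          c)
        = (pvPairsTri (PySem.List.sorted (PySem.Set.ofList viewed) (fun x => x) false)).foldl
            (fun c p => c.insert p (c.getD p 0 + 1)) c := by
    intro viewed c
    have h := pvEnum_flat (fun (c : PySem.Dict (String × String) Int) (p : String × String) =>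
        c.insert p (c.getD p 0 + 1))
      (PySem.List.sorted (PySem.Set.ofList viewed) (fun x => x) false)
      (PySem.List.sorted (PySem.Set.ofList viewed) (fun x => x) false) 0 rfl c
    simpa using h
  have houter :
      (((zs.foldl (fun d p => d.modify p.2 [] (fun l => l ++ [p.1])) PySem.Dict.empty).values).foldl
        (fun c viewed =>
          let vs := PySem.List.sorted (PySem.Set.ofList viewed) (fun x => x) false
          (PySem.List.enumerate vs).foldl
            (fun c ai =>
              (PySem.List.slice vs (some (ai.1 + 1))).foldl
                (fun c s2 => c.insert (ai.2, s2) (c.getD (ai.2, s2) 0 + 1)) c)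
            c)
        (PySem.Dict.empty : PySem.Dict (String × String) Int))
      = ((((zs.foldl (fun d p => d.modify p.2 [] (fun l => l ++ [p.1])) PySem.Dict.empty).values).flatMap
            (fun viewed => pvPairsTri (PySem.List.sorted (PySem.Set.ofList viewed) (fun x => x) false))).foldl
          (fun c p => c.insert p (c.getD p 0 + 1)) (PySem.Dict.empty : PySem.Dict (String × String) Int)) := by
    rw [List.foldl_flatMap]
    congr 1
    funext c viewed
    exact hflat viewed c
  rw [houter, PySem.Dict.getD_foldl_insert_add_one, PySem.Dict.getD_empty, zero_add,
    List.count_flatMap, pvDictB_values, List.map_map]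
  have hper : ∀ u,
      ((List.count (i, j) ∘ fun viewed => pvPairsTri (PySem.List.sorted (PySem.Set.ofList viewed) (fun x => x) false)) ∘ fun u => pvUsersOf zs u) u
        = (if (decide ((i, u) ∈ zs) && decide ((j, u) ∈ zs)) = true then (1 : Nat) else 0) := by
    intro u
    show (pvPairsTri (PySem.List.sorted (PySem.Set.ofList (pvUsersOf zs u)) (fun x => x) false)).count (i, j) = _
    rw [pvCount_pairsTri (PySem.List.sorted_ofList_pairwise_lt _) hij]
    have hmemi : i ∈ PySem.List.sorted (PySem.Set.ofList (pvUsersOf zs u)) (fun x => x) false ↔ (i, u) ∈ zs := by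
      rw [PySem.List.mem_sorted, PySem.Set.mem_ofList, pvMem_usersOf]
    have hmemj : j ∈ PySem.List.sorted (PySem.Set.ofList (pvUsersOf zs u)) (fun x => x) false ↔ (j, u) ∈ zs := by
      rw [PySem.List.mem_sorted, PySem.Set.mem_ofList, pvMem_usersOf]
    simp [hmemi, hmemj]
  rw [List.map_congr_left (fun u _ => hper u), pvSum_ite]

theorem pvScoreA_countP (zs : List (String × String)) (i j : String) :
    pvScoreA zs (i, j)
      = (((PySem.Set.ofList (zs.map (fun q => q.2))).countP
          (fun u => decide ((i, u) ∈ zs) && decide ((j, u) ∈ zs)) : Nat) : Int) := by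
  show (((pvViewers zs i).filter (fun u => (pvViewers zs j).contains u)).length : Int) = _
  have h1 : ((pvViewers zs i).filter (fun u => (pvViewers zs j).contains u)).Nodup :=
    (PySem.Set.nodup_ofList _).filter _
  have h2 : ((PySem.Set.ofList (zs.map (fun q => q.2))).filter
      (fun u => decide ((i, u) ∈ zs) && decide ((j, u) ∈ zs))).Nodup :=
    (PySem.Set.nodup_ofList _).filter _
  have hperm : ((pvViewers zs i).filter (fun u => (pvViewers zs j).contains u)).Perm
      ((PySem.Set.ofList (zs.map (fun q => q.2))).filter
        (fun u => decide ((i, u) ∈ zs) && decide ((j, u) ∈ zs))) := by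
    rw [List.perm_ext_iff_of_nodup h1 h2]
    intro u
    simp only [List.mem_filter, PySem.Set.contains_iff, pvMem_viewers,
      PySem.Set.mem_ofList, List.mem_map, Bool.and_eq_true, decide_eq_true_eq]
    constructor
    · rintro ⟨h3, h4⟩
      exact ⟨⟨(i, u), h3, rfl⟩, h3, h4⟩
    · rintro ⟨-, h3, h4⟩
      exact ⟨h3, h4⟩
  rw [List.countP_eq_length_filter, hperm.length_eq]

-- reduction of the two ports to the abstract selection folds ------------------
theorem pvNested_full (K : List String) (score : String × String → Int)
    (init : Int × Option (String × String)) :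
    K.foldl (fun s i => K.foldl (fun s j => if i == j then s else pvStep score s (i, j)) s) init
      = (pvFullPairs K).foldl (pvStep score) init := by
  rw [pvFullPairs, List.foldl_flatMap]
  congr 1
  funext s i
  rw [pvFoldl_skip (fun j => i == j) (fun s j => pvStep score s (i, j)) K s, List.foldl_map]

theorem pvA_reduce (site_list user_list : List String) (time_list : List Int) :
    highest_affinity site_list user_list time_list
      = ((pvFullPairs (PySem.List.sorted (PySem.Set.ofList ((site_list.zip user_list).map (fun q => q.1))) (fun x => x) false)).foldl
          (pvStep (pvScoreA (site_list.zip user_list))) (-1, none)).2 := by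
  have hshow : highest_affinity site_list user_list time_list
      = ((PySem.List.sorted
            ((site_list.zip user_list).foldl
        (fun d p =>
          let d1 := if d.contains p.1 then d else d.insert p.1 PySem.Set.empty
          d1.insert p.1 (PySem.Set.add (d1.getD p.1 PySem.Set.empty) p.2))
        PySem.Dict.empty).keys (fun x => x) false).foldl
          (fun s i =>
            (PySem.List.sorted
              ((site_list.zip user_list).foldl
        (fun d p =>
          let d1 := if d.contains p.1 then d else d.insert p.1 PySem.Set.empty
          d1.insert p.1 (PySem.Set.add (d1.getD p.1 PySem.Set.empty) p.2))
        PySem.Dict.empty).keys (fun x => x) false).foldl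
              (fun s j => if i == j then s
                else pvStep (fun p : String × String =>
                  PySem.Set.len (PySem.Set.inter
                    (((site_list.zip user_list).foldl
        (fun d p =>
          let d1 := if d.contains p.1 then d else d.insert p.1 PySem.Set.empty
          d1.insert p.1 (PySem.Set.add (d1.getD p.1 PySem.Set.empty) p.2))
        PySem.Dict.empty).getD p.1 PySem.Set.empty)
                    (((site_list.zip user_list).foldl
        (fun d p =>
          let d1 := if d.contains p.1 then d else d.insert p.1 PySem.Set.empty
          d1.insert p.1 (PySem.Set.add (d1.getD p.1 PySem.Set.empty) p.2))
        PySem.Dict.empty).getD p.2 PySem.Set.empty))) s (i, j))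
              s)
          ((-1 : Int), (none : Option (String × String)))).2 := rfl
  rw [hshow, pvDictA_keys, pvNested_full]
  have hs : (fun p : String × String =>
        PySem.Set.len (PySem.Set.inter
          (((site_list.zip user_list).foldl
        (fun d p =>
          let d1 := if d.contains p.1 then d else d.insert p.1 PySem.Set.empty
          d1.insert p.1 (PySem.Set.add (d1.getD p.1 PySem.Set.empty) p.2))
        PySem.Dict.empty).getD p.1 PySem.Set.empty)
          (((site_list.zip user_list).foldl
        (fun d p =>
          let d1 := if d.contains p.1 then d else d.insert p.1 PySem.Set.empty
          d1.insert p.1 (PySem.Set.add (d1.getD p.1 PySem.Set.empty) p.2))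
        PySem.Dict.empty).getD p.2 PySem.Set.empty)))
      = pvScoreA (site_list.zip user_list) := by
    funext p
    rw [pvDictA_getD, pvDictA_getD]
    rfl
  rw [hs]

theorem pvB_reduce (site_list user_list : List String) (time_list : List Int) :
    highest_affinity_alt site_list user_list time_list
      = ((pvPairsTri (PySem.List.sorted (PySem.Set.ofList ((site_list.zip user_list).map (fun q => q.1))) (fun x => x) false)).foldl
          (pvStep (fun p : String × String => (((((site_list.zip user_list).foldl (fun d p => d.modify p.2 [] (fun l => l ++ [p.1])) PySem.Dict.empty).values).foldl
        (fun c viewed =>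
          let vs := PySem.List.sorted (PySem.Set.ofList viewed) (fun x => x) false
          (PySem.List.enumerate vs).foldl
            (fun c ai =>
              (PySem.List.slice vs (some (ai.1 + 1))).foldl
                (fun c s2 => c.insert (ai.2, s2) (c.getD (ai.2, s2) 0 + 1)) c)
            c)
        (PySem.Dict.empty : PySem.Dict (String × String) Int))).getD p 0)) (-1, none)).2 := by
  have hshow : highest_affinity_alt site_list user_list time_list
      = ((PySem.List.enumerate
            (PySem.List.sorted (PySem.Set.ofList ((site_list.zip user_list).map (fun q => q.1))) (fun x => x) false)
            ((0 : Nat) : Int)).foldl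
          (fun s ai =>
            (PySem.List.slice
                (PySem.List.sorted (PySem.Set.ofList ((site_list.zip user_list).map (fun q => q.1))) (fun x => x) false)
                (some (ai.1 + 1))).foldl
              (fun s y => pvStep (fun p : String × String => (((((site_list.zip user_list).foldl (fun d p => d.modify p.2 [] (fun l => l ++ [p.1])) PySem.Dict.empty).values).foldl
        (fun c viewed =>
          let vs := PySem.List.sorted (PySem.Set.ofList viewed) (fun x => x) false
          (PySem.List.enumerate vs).foldl
            (fun c ai =>
              (PySem.List.slice vs (some (ai.1 + 1))).foldl
                (fun c s2 => c.insert (ai.2, s2) (c.getD (ai.2, s2) 0 + 1)) c)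
            c)
        (PySem.Dict.empty : PySem.Dict (String × String) Int))).getD p 0) s (ai.2, y)) s)
          ((-1 : Int), (none : Option (String × String)))).2 := rfl
  rw [hshow,
    pvEnum_flat (pvStep (fun p : String × String => (((((site_list.zip user_list).foldl (fun d p => d.modify p.2 [] (fun l => l ++ [p.1])) PySem.Dict.empty).values).foldl
        (fun c viewed =>
          let vs := PySem.List.sorted (PySem.Set.ofList viewed) (fun x => x) false
          (PySem.List.enumerate vs).foldl
            (fun c ai =>
              (PySem.List.slice vs (some (ai.1 + 1))).foldl
                (fun c s2 => c.insert (ai.2, s2) (c.getD (ai.2, s2) 0 + 1)) c)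
            c)
        (PySem.Dict.empty : PySem.Dict (String × String) Int))).getD p 0))
      (PySem.List.sorted (PySem.Set.ofList ((site_list.zip user_list).map (fun q => q.1))) (fun x => x) false)
      (PySem.List.sorted (PySem.Set.ofList ((site_list.zip user_list).map (fun q => q.1))) (fun x => x) false)
      0 rfl ((-1 : Int), (none : Option (String × String)))]

-- ===== VERDICT (by name: the statement is the Claim_ definition above) =====
theorem highest_affinity_spec : Claim_equal_highest_affinity := by
  intro site_list user_list time_list _
  unfold Spec_highest_affinity
  rw [pvA_reduce site_list user_list time_list, pvB_reduce site_list user_list time_list]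
  have hK := PySem.List.sorted_ofList_pairwise_lt ((site_list.zip user_list).map (fun q => q.1))
  refine pvSelect_eq _ hK _ _ ?_ ?_ ?_
  · intro i j
    rw [pvScoreA_countP, pvScoreA_countP]
    show ((_ : Nat) : Int) = ((_ : Nat) : Int)
    congr 1
    apply List.countP_congr
    intro u _
    simp [Bool.and_comm]
  · intro p hp
    have hij := ((pvMem_pairsTri hK).mp hp).2.2
    have h1 := pvCounts_getD (site_list.zip user_list) hij
    have h2 := pvScoreA_countP (site_list.zip user_list) p.1 p.2
    show (((((site_list.zip user_list).foldl (fun d p => d.modify p.2 [] (fun l => l ++ [p.1])) PySem.Dict.empty).values).foldl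
        (fun c viewed =>
          let vs := PySem.List.sorted (PySem.Set.ofList viewed) (fun x => x) false
          (PySem.List.enumerate vs).foldl
            (fun c ai =>
              (PySem.List.slice vs (some (ai.1 + 1))).foldl
                (fun c s2 => c.insert (ai.2, s2) (c.getD (ai.2, s2) 0 + 1)) c)
            c)
        (PySem.Dict.empty : PySem.Dict (String × String) Int))).getD p 0 = pvScoreA (site_list.zip user_list) p
    calc (((((site_list.zip user_list).foldl (fun d p => d.modify p.2 [] (fun l => l ++ [p.1])) PySem.Dict.empty).values).foldl
        (fun c viewed =>
          let vs := PySem.List.sorted (PySem.Set.ofList viewed) (fun x => x) false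
          (PySem.List.enumerate vs).foldl
            (fun c ai =>
              (PySem.List.slice vs (some (ai.1 + 1))).foldl
                (fun c s2 => c.insert (ai.2, s2) (c.getD (ai.2, s2) 0 + 1)) c)
            c)
        (PySem.Dict.empty : PySem.Dict (String × String) Int))).getD p 0
        = (((((site_list.zip user_list).foldl (fun d p => d.modify p.2 [] (fun l => l ++ [p.1])) PySem.Dict.empty).values).foldl
        (fun c viewed =>
          let vs := PySem.List.sorted (PySem.Set.ofList viewed) (fun x => x) false
          (PySem.List.enumerate vs).foldl
            (fun c ai =>
              (PySem.List.slice vs (some (ai.1 + 1))).foldl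
                (fun c s2 => c.insert (ai.2, s2) (c.getD (ai.2, s2) 0 + 1)) c)
            c)
        (PySem.Dict.empty : PySem.Dict (String × String) Int))).getD (p.1, p.2) 0 := rfl
      _ = _ := h1
      _ = pvScoreA (site_list.zip user_list) (p.1, p.2) := h2.symm
      _ = pvScoreA (site_list.zip user_list) p := rfl
  · intro p
    exact Int.natCast_nonneg _
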